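-- pv_equiv track=rewrite | github.com/miori-K/google_STEP | 01/lec1-2.py | answer
-- ===== SOURCE A (Python) =====
-- def answer(score_words_list):
--     max_list = []
--     max_score = 0
--     for i in range(len(score_words_list)):
--         if max_score == score_words_list[i][1]:
--             max_list.append(score_words_list[i][0])
--         elif max_score < score_words_list[i][1]:
--             max_score = score_words_list[i][1]
--             max_list = []
--             max_list.append(score_words_list[i][0])
--     return max_list,max_score
-- ===== SOURCE B (Python) =====
-- def answer(score_words_list):
--     best = max([0] + [s for _, s in score_words_list])
--     return [w for w, s in score_words_list if s == best], best
-- ===== Notes on version B (the rewrite author's own statement) =====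
-- stated objective: simpler
-- what changed: Replaces A's single fused scan (running max with reset-and-collect list) by a two-pass compute-then-filter: first the maximum floored at 0, then a comprehension collecting the words with that score.
import Mathlib
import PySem

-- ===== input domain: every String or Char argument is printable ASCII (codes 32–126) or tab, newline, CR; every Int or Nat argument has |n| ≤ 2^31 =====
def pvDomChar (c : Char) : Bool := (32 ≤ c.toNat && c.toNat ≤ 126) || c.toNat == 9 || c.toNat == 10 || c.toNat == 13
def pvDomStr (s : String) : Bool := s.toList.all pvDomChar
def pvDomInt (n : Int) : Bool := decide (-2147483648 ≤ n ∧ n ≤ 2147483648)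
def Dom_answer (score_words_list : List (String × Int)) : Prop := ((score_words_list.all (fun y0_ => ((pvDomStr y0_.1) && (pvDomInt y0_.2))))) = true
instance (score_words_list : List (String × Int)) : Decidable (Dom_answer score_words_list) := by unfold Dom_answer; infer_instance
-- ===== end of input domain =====

-- B replaces A's fused max-and-collect scan by a two-pass compute-then-filter decomposition (simpler).


-- ===== PORT A =====
-- the for-loop over range(len(...)) with indexing, as structural recursion over the items
-- with the same state (max_list, max_score)
def answerLoop (l : List (String × Int)) (max_list : List String) (max_score : Int) :
    List String × Int :=
  match l with
  | [] => (max_list, max_score)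
  | (w, s) :: rest =>
    if max_score = s then answerLoop rest (max_list ++ [w]) max_score
    else if max_score < s then answerLoop rest [w] s
    else answerLoop rest max_list max_score

def answer (score_words_list : List (String × Int)) : List String × Int :=
  answerLoop score_words_list [] 0

-- ===== PORT B =====
def answer_alt (score_words_list : List (String × Int)) : List String × Int :=
  let best := ((score_words_list.map (·.2)).foldl max 0)
  ((score_words_list.filter (fun p => p.2 = best)).map (·.1), best)

-- ===== PRECONDITION & SPEC =====
def Spec_answer (score_words_list : List (String × Int)) (out : List String × Int) : Prop := out = answer_alt score_words_list
instance (score_words_list : List (String × Int)) (out : List String × Int) : Decidable (Spec_answer score_words_list out) := by unfold Spec_answer; infer_instance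

-- ===== CLAIM (what is proved, stated in full; the proofs are below) =====
def Claim_equal_answer : Prop := ∀ (score_words_list : List (String × Int)), Dom_answer score_words_list → Spec_answer score_words_list (answer score_words_list)

-- ===== LEMMAS AND PROOFS =====

-- the loop invariant: from state (ml, ms) the loop returns the overall max B and the words
-- scoring B, prefixed by ml exactly when no later score beats ms
theorem answerLoop_eq (l : List (String × Int)) (ml : List String) (ms : Int) :
    answerLoop l ml ms =
      ((if (l.map (·.2)).foldl max ms = ms then ml else []) ++
        (l.filter (fun p => p.2 = (l.map (·.2)).foldl max ms)).map (·.1),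
       (l.map (·.2)).foldl max ms) := by
  induction l generalizing ml ms with
  | nil => simp [answerLoop]
  | cons hd tl ih =>
    obtain ⟨w, s⟩ := hd
    by_cases h1 : ms = s
    · subst h1
      simp only [answerLoop, List.map_cons, List.foldl_cons, max_self]
      rw [ih]
      by_cases h2 : (tl.map (·.2)).foldl max ms = ms
      · simp [h2]
      · have h2' : ¬ ms = (tl.map (·.2)).foldl max ms := fun h => h2 h.symm
        simp [h2, h2']
    · by_cases h2 : ms < s
      · simp only [answerLoop, if_neg h1, if_pos h2, List.map_cons, List.foldl_cons,
          max_eq_right h2.le]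
        rw [ih]
        have hsle : s ≤ (tl.map (·.2)).foldl max s := (PySem.List.le_foldl_max (tl.map (·.2)) s).1
        have hne : ¬ (tl.map (·.2)).foldl max s = ms := by omega
        by_cases h3 : (tl.map (·.2)).foldl max s = s
        · simp [h3]
          exact fun h => absurd h.symm h1
        · have h3' : ¬ s = (tl.map (·.2)).foldl max s := fun h => h3 h.symm
          simp [h3, h3', hne]
      · have h3 : s < ms := by omega
        simp only [answerLoop, if_neg h1, if_neg h2, List.map_cons, List.foldl_cons,
            max_eq_left h3.le]
        rw [ih]
        have hle : ms ≤ (tl.map (·.2)).foldl max ms := (PySem.List.le_foldl_max (tl.map (·.2)) ms).1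
        have hne : ¬ s = (tl.map (·.2)).foldl max ms := by omega
        simp [hne]

-- ===== VERDICT (by name: the statement is the Claim_ definition above) =====
theorem answer_spec : Claim_equal_answer := by
  intro l _
  unfold Spec_answer answer answer_alt
  rw [answerLoop_eq]
  by_cases h : (l.map (·.2)).foldl max 0 = 0 <;> simp [h]
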